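-- pv_equiv track=rewrite | github.com/winkeung/LibrePyListEditor | LibrePyListEditor.py | rstrip_row
-- ===== SOURCE A (Python) =====
-- def rstrip_row(row):
--     row = list(row)
--     for c in range(len(row) - 1, -1, -1):
--         i = row[c]
--         if i == "":
--             row.pop(c)
--         else:
--             break
--     return tuple(row)
-- ===== SOURCE B (Python) =====
-- def rstrip_row(row):
--     row = list(row)
--     last = 0
--     for i, s in enumerate(row):
--         if s != "":
--             last = i + 1
--     return tuple(row[:last])
-- ===== Notes on version B (the rewrite author's own statement) =====
-- stated objective: simpler
-- what changed: Replaces the backward pop-from-the-tail loop with a single forward pass that records the cutoff index after the last non-empty cell and slices once; no list mutation.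
import Mathlib
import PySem

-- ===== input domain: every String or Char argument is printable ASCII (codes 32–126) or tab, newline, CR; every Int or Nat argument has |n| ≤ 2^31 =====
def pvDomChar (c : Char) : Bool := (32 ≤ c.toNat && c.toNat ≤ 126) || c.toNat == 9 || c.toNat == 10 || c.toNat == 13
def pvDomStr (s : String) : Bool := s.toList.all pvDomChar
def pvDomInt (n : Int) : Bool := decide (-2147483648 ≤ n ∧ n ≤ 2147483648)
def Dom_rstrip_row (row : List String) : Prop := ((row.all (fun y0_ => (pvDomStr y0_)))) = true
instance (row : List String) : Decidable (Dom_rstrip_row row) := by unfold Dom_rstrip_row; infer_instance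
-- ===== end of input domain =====

-- B replaces A's backward pop-from-the-tail loop by one forward pass that records the
-- cutoff after the last non-empty cell and slices once (objective: simpler; return value only —
-- Python A returns a tuple, B a tuple of the same items, both are List String here).

-- ===== PORT A =====
-- the for-c-in-range(len-1,-1,-1) loop with `break` as early return; pop(c) via PySem.List.pop?
-- (the `none` branches are unreachable in A: c is always a valid index when read)
def rstrip_row_loop (row : List String) (c : Int) : List String :=
  if _h : 0 ≤ c then
    match PySem.List.pyGet? row c with
    | none => row        -- unreachable (Python would raise; A keeps c in range)
    | some i =>
      if i == "" then
        rstrip_row_loop ((PySem.List.pop? row c).map (·.2) |>.getD row) (c - 1)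
      else row
  else row
termination_by (c + 1).toNat
decreasing_by omega

def rstrip_row (row : List String) : List String :=
  rstrip_row_loop row ((row.length : Int) - 1)

-- ===== PORT B =====
def rstrip_row_alt (row : List String) : List String :=
  let last := (PySem.List.enumerate row).foldl
    (fun last p => if p.2 != "" then p.1 + 1 else last) 0
  PySem.List.slice row none (some last)

-- ===== PRECONDITION & SPEC =====
def Spec_rstrip_row (row : List String) (out : List String) : Prop := out = rstrip_row_alt row
instance (row : List String) (out : List String) : Decidable (Spec_rstrip_row row out) := by unfold Spec_rstrip_row; infer_instance

-- ===== CLAIM (what is proved, stated in full; the proofs are below) =====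
def Claim_equal_rstrip_row : Prop := ∀ (row : List String), Dom_rstrip_row row → Spec_rstrip_row row (rstrip_row row)

-- ===== LEMMAS AND PROOFS =====

-- B's fold: shorthand for the cutoff index
def lastIdx (row : List String) : Int :=
  (PySem.List.enumerate row).foldl (fun last p => if p.2 != "" then p.1 + 1 else last) 0

lemma lastIdx_bounds (row : List String) : 0 ≤ lastIdx row ∧ lastIdx row ≤ (row.length : Int) := by
  induction row using List.reverseRecOn with
  | nil => simp [lastIdx]
  | append_singleton xs x ih =>
    simp only [lastIdx, PySem.List.enumerate_append, List.foldl_append] at *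
    simp only [PySem.List.enumerate, List.foldl_cons, List.foldl_nil, List.length_append,
      List.length_singleton]
    split <;> push_cast <;> omega

lemma lastIdx_append (xs : List String) (x : String) :
    lastIdx (xs ++ [x]) = if x != "" then (xs.length : Int) + 1 else lastIdx xs := by
  simp only [lastIdx, PySem.List.enumerate_append, List.foldl_append, PySem.List.enumerate,
    List.foldl_cons, List.foldl_nil]
  split <;> simp

lemma alt_eq (row : List String) :
    rstrip_row_alt row = PySem.List.slice row none (some (lastIdx row)) := rfl

lemma alt_append (xs : List String) (x : String) :
    rstrip_row_alt (xs ++ [x]) = if x = "" then rstrip_row_alt xs else xs ++ [x] := by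
  have hb := lastIdx_bounds xs
  rw [alt_eq, alt_eq, lastIdx_append]
  by_cases hx : x = ""
  · -- x = "": last unchanged, slice of the longer list equals slice of xs
    simp only [hx, bne_self_eq_false, Bool.false_eq_true, if_false]
    rw [PySem.List.slice_to _ hb.1, PySem.List.slice_to _ hb.1]
    rw [List.take_append_of_le_length (by omega : (lastIdx xs).toNat ≤ xs.length)]
    simp
  · -- x ≠ "": take everything
    rw [if_pos (by simpa using hx), if_neg hx]
    rw [show ((xs.length : Int) + 1) = ((xs.length + 1 : Nat) : Int) by push_cast; ring]
    rw [PySem.List.slice_to_natCast]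
    exact List.take_of_length_le (by simp)

lemma loop_append (xs : List String) (x : String) :
    rstrip_row_loop (xs ++ [x]) (xs.length : Int) =
      if x = "" then rstrip_row_loop xs ((xs.length : Int) - 1) else xs ++ [x] := by
  rw [rstrip_row_loop]
  have hget : PySem.List.pyGet? (xs ++ [x]) (xs.length : Int) = some x := by
    simp
  have hpop : PySem.List.pop? (xs ++ [x]) (xs.length : Int) = some (x, xs) := by
    rw [PySem.List.pop?_natCast (xs ++ [x]) xs.length (by simp)]
    have he : (xs ++ [x]).eraseIdx xs.length = xs := by
      induction xs with
      | nil => rfl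
      | cons y ys ih => simp [ih]
    simp [he]
  rw [dif_pos (by positivity)]
  rw [hget]
  by_cases hx : x = ""
  · subst hx; simp [hpop]
  · simp [hx]

lemma rstrip_eq_alt (row : List String) : rstrip_row row = rstrip_row_alt row := by
  induction row using List.reverseRecOn with
  | nil =>
    simp [rstrip_row, rstrip_row_alt, rstrip_row_loop, PySem.List.enumerate, PySem.List.slice_to]
  | append_singleton xs x ih =>
    rw [alt_append]
    unfold rstrip_row
    rw [show ((xs ++ [x]).length : Int) - 1 = (xs.length : Int) by simp]
    rw [loop_append]
    by_cases hx : x = "" <;> simp [hx]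
    rw [← ih]; rfl

-- ===== VERDICT (by name: the statement is the Claim_ definition above) =====
theorem rstrip_row_spec : Claim_equal_rstrip_row := by
  intro row _
  exact rstrip_eq_alt row
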